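-- pv_equiv track=rewrite | github.com/tom-sartori/coursPolytech | S5/systeme/python/tpPython/tp1/main.py | produitEntiersPairs
-- ===== SOURCE A (Python) =====
-- def produitEntiersPairs(n):
--     i: int
--     result: int = 1
--
--     if (n % 2) != 0:
--         n -= 1
--
--     i = n
--     while i > 0:
--         result = result * i
--         i -= 2
--
--     return result
-- ===== SOURCE B (Python) =====
-- def produitEntiersPairs(n):
--     k = n // 2
--     if k <= 0:
--         return 1
--     result = 1
--     for i in range(1, k + 1):
--         result *= i
--     return result * (2 ** k)
-- ===== Notes on version B (the rewrite author's own statement) =====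
-- stated objective: alternative
-- what changed: Replaces the downward step-by-two while loop over the even integers by the closed identity: with k = n//2, the product equals (k factorial) times a single power of two, computed by a forward factorial loop over 1..k.
import Mathlib
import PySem

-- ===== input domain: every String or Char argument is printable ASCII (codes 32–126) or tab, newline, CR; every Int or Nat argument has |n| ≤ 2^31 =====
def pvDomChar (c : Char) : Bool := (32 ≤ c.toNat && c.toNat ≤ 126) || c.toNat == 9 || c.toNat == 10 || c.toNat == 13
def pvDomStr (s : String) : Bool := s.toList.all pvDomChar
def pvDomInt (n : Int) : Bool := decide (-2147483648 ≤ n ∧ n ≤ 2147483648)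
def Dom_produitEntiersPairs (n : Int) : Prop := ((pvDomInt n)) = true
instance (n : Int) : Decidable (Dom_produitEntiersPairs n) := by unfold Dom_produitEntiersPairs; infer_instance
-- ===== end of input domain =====

-- B computes the same product via the identity 2*4*...*2k = 2^k * k! (forward factorial loop); same cost, different structure.

-- ===== PORT A =====
-- the 'while i > 0: result *= i; i -= 2' loop
def pvLoopA (i result : Int) : Int :=
  if h : i > 0 then pvLoopA (i - 2) (result * i) else result
termination_by i.toNat
decreasing_by omega

def produitEntiersPairs (n : Int) : Int :=
  let n' : Int := if PySem.Int.mod n 2 ≠ 0 then n - 1 else n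
  pvLoopA n' 1

-- ===== PORT B =====
def produitEntiersPairs_alt (n : Int) : Int :=
  let k : Int := PySem.Int.floordiv n 2
  if k ≤ 0 then 1
  else ((PySem.List.pyRange 1 (k + 1) 1).foldl (fun acc i => acc * i) 1) * 2 ^ k.toNat

-- ===== PRECONDITION & SPEC =====
def Spec_produitEntiersPairs (n : Int) (out : Int) : Prop := out = produitEntiersPairs_alt n
instance (n : Int) (out : Int) : Decidable (Spec_produitEntiersPairs n out) := by unfold Spec_produitEntiersPairs; infer_instance

-- ===== CLAIM (what is proved, stated in full; the proofs are below) =====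
def Claim_equal_produitEntiersPairs : Prop := ∀ (n : Int), Dom_produitEntiersPairs n → Spec_produitEntiersPairs n (produitEntiersPairs n)

-- ===== LEMMAS AND PROOFS =====

lemma pvLoopA_nonpos (i r : Int) (h : ¬ i > 0) : pvLoopA i r = r := by
  rw [pvLoopA]; simp [h]

lemma pvLoopA_even (k : Nat) : ∀ r : Int, pvLoopA (2 * (k : Int)) r = r * 2 ^ k * (Nat.factorial k : Int) := by
  induction k with
  | zero => intro r; rw [pvLoopA]; simp [Nat.factorial]
  | succ m ih =>
    intro r
    rw [pvLoopA]
    have hpos : (2 * ((m + 1 : Nat) : Int)) > 0 := by push_cast; omega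
    simp only [hpos, dif_pos]
    have harg : (2 * ((m + 1 : Nat) : Int)) - 2 = 2 * (m : Int) := by push_cast; ring
    rw [harg, ih]
    push_cast [Nat.factorial_succ]
    ring

lemma pvFactLoop (k : Nat) : ∀ r : Int,
    (PySem.List.pyRange 1 ((k : Int) + 1) 1).foldl (fun acc i => acc * i) r = r * (Nat.factorial k : Int) := by
  induction k with
  | zero => intro r; simp [Nat.factorial]
  | succ m ih =>
    intro r
    have hsplit : PySem.List.pyRange 1 (((m + 1 : Nat) : Int) + 1) 1
        = PySem.List.pyRange 1 ((m : Int) + 1) 1 ++ [((m : Int) + 1)] := by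
      have := PySem.List.pyRange_one_succ_right (a := 1) (b := (m : Int) + 1) (by omega)
      simpa using this
    rw [hsplit, List.foldl_append, ih]
    simp only [List.foldl]
    push_cast [Nat.factorial_succ]
    ring

theorem produitEntiersPairs_eq (n : Int) : produitEntiersPairs n = produitEntiersPairs_alt n := by
  unfold produitEntiersPairs produitEntiersPairs_alt
  set k : Int := PySem.Int.floordiv n 2 with hk
  have hdecomp : k * 2 + PySem.Int.mod n 2 = n := PySem.Int.floordiv_mul_add_mod n 2
  have hmodr : 0 ≤ PySem.Int.mod n 2 ∧ PySem.Int.mod n 2 < 2 := by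
    have h1 : PySem.Int.mod n 2 = n % 2 := PySem.Int.mod_eq_emod_of_pos (a := n) (b := 2) (by omega)
    constructor <;> [exact h1 ▸ Int.emod_nonneg n (by omega); exact h1 ▸ Int.emod_lt_of_pos n (by omega)]
  have hn' : (if PySem.Int.mod n 2 ≠ 0 then n - 1 else n) = 2 * k := by
    by_cases hm : PySem.Int.mod n 2 = 0
    · rw [if_neg (fun h => h hm)]; omega
    · rw [if_pos hm]; omega
  rw [hn']
  by_cases hk0 : k ≤ 0
  · rw [pvLoopA_nonpos _ _ (by omega)]; simp [hk0]
  · have hkn : k = ((k.toNat : Nat) : Int) := by omega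
    rw [if_neg hk0, hkn, pvLoopA_even, pvFactLoop, Int.toNat_natCast]
    ring

-- ===== VERDICT (by name: the statement is the Claim_ definition above) =====
theorem produitEntiersPairs_spec : Claim_equal_produitEntiersPairs := by
  intro n _
  exact produitEntiersPairs_eq n
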